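-- pv_equiv track=rewrite | github.com/M-Malek/Python-Checkio-exercises | Electronic Station/Words_Order.py | words_order
-- ===== SOURCE A (Python) =====
-- def words_order(text: str, words: list):
--     text = text.split(" ")
--     check_list = []
--     j = 0
--     for i in words:
--         if words.count(i) >= 2:
--             return False
--
--     if len(words) == 1:
--         for i in text:
--             if i == words[0]:
--                 check_list.append(i)
--                 break
--     else:
--         for i in text:
--             if j > len(words)-1:
--                 pass
--             elif i == words[j]:
--                 check_list.append(i)
--                 j += 1
--
--     if check_list == words:
--         return True
--     else:
--         return False
-- ===== SOURCE B (Python) =====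
-- def words_order(text: str, words: list):
--     if len(set(words)) != len(words):
--         return False
--     it = iter(text.split(" "))
--     return all(word in it for word in words)
-- ===== Notes on version B (the rewrite author's own statement) =====
-- stated objective: idiomatic
-- what changed: A's duplicate loop via list.count and its text-scan with a word index j are replaced by a set()-length duplicate guard and the shared-iterator subsequence idiom all(word in it for word in words), which iterates over the words consuming the text iterator instead of scanning the text with an index into words.
import Mathlib
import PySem

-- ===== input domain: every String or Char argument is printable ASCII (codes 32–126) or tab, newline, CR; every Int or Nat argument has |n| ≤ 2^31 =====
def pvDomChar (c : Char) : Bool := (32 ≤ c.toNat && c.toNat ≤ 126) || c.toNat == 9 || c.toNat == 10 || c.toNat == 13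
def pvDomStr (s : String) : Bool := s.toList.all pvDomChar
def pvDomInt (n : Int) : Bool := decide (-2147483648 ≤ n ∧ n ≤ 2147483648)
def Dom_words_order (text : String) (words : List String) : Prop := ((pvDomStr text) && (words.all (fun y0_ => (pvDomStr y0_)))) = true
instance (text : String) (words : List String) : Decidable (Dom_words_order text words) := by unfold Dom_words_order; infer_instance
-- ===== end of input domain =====

-- B is the idiomatic rewrite: a duplicate guard via set(), then the shared-iterator
-- subsequence idiom over the words, replacing A's index-j scan of the text (objective: idiomatic).

-- ===== PORT A =====
-- 'for i in words: if words.count(i) >= 2: return False'  (early return on first duplicate)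
def woDup (allw : List String) : List String → Bool
  | [] => false
  | i :: rest => if 2 ≤ allw.count i then true else woDup allw rest

-- the len(words)==1 loop: scan text, append the first hit and break
def woFind (w : String) : List String → List String
  | [] => []
  | t :: ts => if t = w then [t] else woFind w ts

-- the else loop: 'if j > len(words)-1: pass elif i == words[j]: append; j += 1'
-- (Python's int test 'j > len(words)-1' is rendered as 'words.length ≤ j', identical over ℤ)
def woScan (words : List String) : List String → Nat → List String → List String
  | [], _, check => check
  | t :: ts, j, check =>
      if words.length ≤ j then woScan words ts j check
      else if t = words.getD j "" then woScan words ts (j + 1) (check ++ [t])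
      else woScan words ts j check

def words_order (text : String) (words : List String) : Bool :=
  let textL := (PySem.Str.split? text " ").getD []
  if woDup words words then false
  else
    let check_list :=
      if words.length = 1 then woFind (words.getD 0 "") textL
      else woScan words textL 0 []
    check_list == words

-- ===== PORT B =====
-- 'all(word in it for word in words)' with it = iter(text.split(" ")):
-- recursion over the words, consuming the text list
def woConsume : List String → List String → Bool
  | [], _ => true
  | _ :: _, [] => false
  | w :: ws, t :: ts => if t = w then woConsume ws ts else woConsume (w :: ws) ts

def words_order_alt (text : String) (words : List String) : Bool :=
  if (PySem.Set.ofList words).length ≠ words.length then false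
  else woConsume words ((PySem.Str.split? text " ").getD [])

-- ===== PRECONDITION & SPEC =====
def Spec_words_order (text : String) (words : List String) (out : Bool) : Prop := out = words_order_alt text words
instance (text : String) (words : List String) (out : Bool) : Decidable (Spec_words_order text words out) := by unfold Spec_words_order; infer_instance

-- ===== CLAIM (what is proved, stated in full; the proofs are below) =====
def Claim_equal_words_order : Prop := ∀ (text : String) (words : List String), Dom_words_order text words → Spec_words_order text words (words_order text words)

-- ===== LEMMAS AND PROOFS =====

-- duplicate guards agree: A's count-based early return ↔ B's set-length test
theorem woDup_eq_any (allw ws : List String) :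
    woDup allw ws = ws.any (fun i => decide (2 ≤ allw.count i)) := by
  induction ws with
  | nil => rfl
  | cons i rest ih =>
      simp only [woDup, List.any_cons, ih]
      by_cases h : 2 ≤ allw.count i <;> simp [h]

theorem woDup_eq_true_iff (ws : List String) : woDup ws ws = true ↔ ¬ ws.Nodup := by
  rw [woDup_eq_any, List.nodup_iff_count_le_one]
  simp only [List.any_eq_true, decide_eq_true_eq, not_forall]
  constructor
  · rintro ⟨i, _, h2⟩; exact ⟨i, by omega⟩
  · rintro ⟨i, h⟩
    refine ⟨i, ?_, by omega⟩
    have : 0 < ws.count i := by omega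
    exact List.count_pos_iff.mp this

theorem ofList_append_singleton (ws : List String) (x : String) :
    PySem.Set.ofList (ws ++ [x]) = PySem.Set.add (PySem.Set.ofList ws) x := by
  simp [PySem.Set.ofList_eq_foldl, List.foldl_append]

theorem nodup_snoc (ws : List String) (x : String) :
    (ws ++ [x]).Nodup ↔ ws.Nodup ∧ x ∉ ws := by
  rw [← List.nodup_reverse, List.reverse_append]
  simp only [List.reverse_singleton, List.singleton_append, List.nodup_cons,
    List.mem_reverse, List.nodup_reverse]
  tauto

theorem ofList_length_le (ws : List String) :
    (PySem.Set.ofList ws).length ≤ ws.length := by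
  induction ws using List.reverseRecOn with
  | nil => simp [PySem.Set.ofList]
  | append_singleton ws x ih =>
      rw [ofList_append_singleton, PySem.Set.add_eq_ite]
      split_ifs <;> simp <;> omega

theorem ofList_length_eq_iff (ws : List String) :
    (PySem.Set.ofList ws).length = ws.length ↔ ws.Nodup := by
  induction ws using List.reverseRecOn with
  | nil => simp [PySem.Set.ofList]
  | append_singleton ws x ih =>
      rw [ofList_append_singleton, PySem.Set.add_eq_ite, nodup_snoc]
      have hle := ofList_length_le ws
      by_cases hx : x ∈ PySem.Set.ofList ws
      · have hx' : x ∈ ws := (PySem.Set.mem_ofList ws x).mp hx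
        rw [if_pos hx]
        simp only [List.length_append, List.length_singleton]
        constructor
        · intro h; omega
        · rintro ⟨-, hnx⟩; exact absurd hx' hnx
      · have hx' : x ∉ ws := fun h => hx ((PySem.Set.mem_ofList ws x).mpr h)
        rw [if_neg hx]
        simp only [List.length_append, List.length_singleton]
        constructor
        · intro h; exact ⟨ih.mp (by omega), hx'⟩
        · rintro ⟨hn, -⟩; have := ih.mpr hn; omega

-- the singleton branch: woFind finds the first hit, as a membership test
theorem woFind_eq (w : String) (ts : List String) :
    (woFind w ts == [w]) = ts.contains w := by
  induction ts with
  | nil => simp [woFind]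
  | cons t ts ih =>
      simp only [woFind, List.contains_cons]
      by_cases h : t = w
      · subst h; simp
      · simp [h, ih, Ne.symm h]

theorem woConsume_singleton (w : String) (ts : List String) :
    woConsume [w] ts = ts.contains w := by
  induction ts with
  | nil => simp [woConsume]
  | cons t ts ih =>
      simp only [woConsume, List.contains_cons]
      by_cases h : t = w
      · subst h; simp
      · simp [h, ih, Ne.symm h]

theorem woConsume_nil_right : ∀ ws : List String, woConsume ws [] = (ws == []) := by
  intro ws; cases ws <;> rfl

-- main invariant: scanning the text from word index j with check = words.take j
-- succeeds exactly when the remaining words are consumed from the remaining text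
theorem woScan_eq_consume (words : List String) :
    ∀ (ts : List String) (j : Nat), j ≤ words.length →
      (woScan words ts j (words.take j) == words) = woConsume (words.drop j) ts := by
  intro ts
  induction ts with
  | nil =>
      intro j hj
      simp only [woScan, woConsume_nil_right]
      by_cases h : j = words.length
      · subst h; simp
      · have hlt : j < words.length := by omega
        have h1 : (words.take j == words) = false := by
          apply beq_false_of_ne
          intro e
          have := congrArg List.length e
          simp [List.length_take] at this; omega
        have h2 : (words.drop j == ([] : List String)) = false := by
          apply beq_false_of_ne
          intro e
          have := congrArg List.length e
          simp [List.length_drop] at this; omega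
        rw [h1, h2]
  | cons t ts ih =>
      intro j hj
      simp only [woScan]
      by_cases hge : words.length ≤ j
      · have hj' : j = words.length := by omega
        rw [if_pos hge, ih j hj]
        subst hj'
        simp [List.drop_length, woConsume]
      · have hlt : j < words.length := by omega
        rw [if_neg hge]
        have hget : words.getD j "" = words[j] := List.getD_eq_getElem words "" hlt
        have hdrop : words.drop j = words[j] :: words.drop (j + 1) :=
          (List.getElem_cons_drop hlt).symm
        by_cases h : t = words.getD j ""
        · rw [if_pos h]
          have htake : words.take j ++ [t] = words.take (j + 1) := by
            rw [h, hget, List.take_add_one, List.getElem?_eq_getElem hlt]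
            rfl
          rw [htake, ih (j + 1) (by omega), hdrop]
          simp only [woConsume, if_pos (hget ▸ h)]
        · rw [if_neg h, ih j (by omega), hdrop]
          simp only [woConsume]
          rw [if_neg (fun e => h (e.trans hget.symm))]

-- ===== VERDICT (by name: the statement is the Claim_ definition above) =====
theorem words_order_spec : Claim_equal_words_order := by
  intro text words _
  unfold Spec_words_order words_order words_order_alt
  simp only []
  by_cases hdup : words.Nodup
  · have hA : woDup words words = false := by
      rw [← Bool.not_eq_true, woDup_eq_true_iff]; exact not_not_intro hdup
    have hB : ¬ (PySem.Set.ofList words).length ≠ words.length :=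
      not_not_intro ((ofList_length_eq_iff words).mpr hdup)
    rw [if_neg (by simp [hA]), if_neg hB]
    by_cases h1 : words.length = 1
    · obtain ⟨w, hw⟩ : ∃ w, words = [w] := by
        cases words with
        | nil => simp at h1
        | cons a t => cases t with
          | nil => exact ⟨a, rfl⟩
          | cons b t' => simp at h1
      subst hw
      rw [if_pos h1]
      simp only [List.getD, List.getElem?_cons_zero, Option.getD_some]
      rw [woFind_eq, woConsume_singleton]
    · rw [if_neg h1]
      have := woScan_eq_consume words ((PySem.Str.split? text " ").getD []) 0 (Nat.zero_le _)
      simpa using this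
  · have hA : woDup words words = true := (woDup_eq_true_iff words).mpr hdup
    have hB : (PySem.Set.ofList words).length ≠ words.length :=
      fun e => hdup ((ofList_length_eq_iff words).mp e)
    rw [if_pos (by simp [hA]), if_pos hB]
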